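-- pv_equiv track=rewrite | github.com/ikokkari/PythonProblems | labs109.py | substitution_words
-- ===== SOURCE A (Python) =====
-- def substitution_words(pattern, words):
--     n, result = len(pattern), []
--     for word in words:
--         if len(word) == n:
--             subs, taken = dict(), set()
--             for (c1, c2) in zip(word, pattern):
--                 if c1 in subs:
--                     if subs[c1] != c2:
--                         break
--                 else:
--                     if c2 in taken:
--                         break
--                     else:
--                         taken.add(c2)
--                         subs[c1] = c2
--             else:  # Executed if there was no break in previous loop
--                 result.append(word)
--     return result
-- ===== SOURCE B (Python) =====
-- def substitution_words(pattern, words):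
--     # Keep a word iff positions agree in equality pattern with the pattern string
--     # (positional equivalence-relation comparison; enforces the bijection both ways).
--     n = len(pattern)
--     return [word for word in words
--             if len(word) == n
--             and all((word[i] == word[j]) == (pattern[i] == pattern[j])
--                     for j in range(n) for i in range(j))]
-- ===== Notes on version B (the rewrite author's own statement) =====
-- stated objective: alternative
-- what changed: Replaces the incremental dict+set substitution check (with break/else) by a stateless positional test: a word is kept iff for every pair of positions i<j, word[i]==word[j] exactly when pattern[i]==pattern[j], expressed as one comprehension with all().
import Mathlib
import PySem

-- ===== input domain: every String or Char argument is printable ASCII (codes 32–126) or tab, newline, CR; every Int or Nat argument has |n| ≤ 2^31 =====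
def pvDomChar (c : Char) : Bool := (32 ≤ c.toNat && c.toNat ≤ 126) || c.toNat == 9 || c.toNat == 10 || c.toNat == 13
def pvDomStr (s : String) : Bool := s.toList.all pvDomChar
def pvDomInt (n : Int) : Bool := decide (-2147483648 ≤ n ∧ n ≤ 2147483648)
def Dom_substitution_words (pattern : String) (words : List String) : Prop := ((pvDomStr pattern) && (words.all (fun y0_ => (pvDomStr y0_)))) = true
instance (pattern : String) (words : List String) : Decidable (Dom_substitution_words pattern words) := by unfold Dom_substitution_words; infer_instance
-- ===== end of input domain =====

-- B replaces A's incremental dict+set substitution check by a stateless pairwise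
-- positional comparison (same value everywhere; not claimed faster).

-- ===== PORT A =====
-- inner 'for (c1, c2) in zip(word, pattern): …' with break; true = no break occurred
def pvCheckA : List (Char × Char) → PySem.Dict Char Char → PySem.Set Char → Bool
  | [], _, _ => true
  | (c1, c2) :: rest, subs, taken =>
    match subs.get? c1 with
    | some v => if v ≠ c2 then false else pvCheckA rest subs taken
    | none =>
      if taken.contains c2 then false
      else pvCheckA rest (subs.insert c1 c2) (PySem.Set.add taken c2)

def substitution_words (pattern : String) (words : List String) : List String :=
  let n := pattern.toList.length
  words.foldl (fun result word =>
    if word.toList.length = n then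
      if pvCheckA (word.toList.zip pattern.toList) PySem.Dict.empty PySem.Set.empty
      then result ++ [word] else result
    else result) []

-- ===== PORT B =====
def substitution_words_alt (pattern : String) (words : List String) : List String :=
  let p := pattern.toList
  let n : Int := p.length
  words.filter (fun word =>
    let w := word.toList
    decide ((w.length : Int) = n) &&
    (PySem.List.pyRange 0 n 1).all (fun j =>
      (PySem.List.pyRange 0 j 1).all (fun i =>
        (PySem.List.pyGetD w i ' ' == PySem.List.pyGetD w j ' ') ==
        (PySem.List.pyGetD p i ' ' == PySem.List.pyGetD p j ' '))))

-- ===== PRECONDITION & SPEC =====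
def Spec_substitution_words (pattern : String) (words : List String) (out : List String) : Prop := out = substitution_words_alt pattern words
instance (pattern : String) (words : List String) (out : List String) : Decidable (Spec_substitution_words pattern words out) := by unfold Spec_substitution_words; infer_instance

-- ===== CLAIM (what is proved, stated in full; the proofs are below) =====
def Claim_equal_substitution_words : Prop := ∀ (pattern : String) (words : List String), Dom_substitution_words pattern words → Spec_substitution_words pattern words (substitution_words pattern words)

-- ===== LEMMAS AND PROOFS =====

-- "the relation R is a consistent partial bijection"
def pvRelOK (R : Char → Char → Prop) : Prop :=
  ∀ a b c d, R a b → R c d → (a = c ↔ b = d)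

theorem pvRelOK_congr {R S : Char → Char → Prop}
    (h : ∀ a b, R a b ↔ S a b) : pvRelOK R ↔ pvRelOK S := by
  constructor <;> intro hR a b c d h1 h2
  · exact hR a b c d ((h a b).2 h1) ((h c d).2 h2)
  · exact hR a b c d ((h a b).1 h1) ((h c d).1 h2)

theorem pvCheckA_iff (L : List (Char × Char)) (subs : PySem.Dict Char Char)
    (taken : PySem.Set Char)
    (Hfun : pvRelOK (fun a b => subs.get? a = some b))
    (Htaken : ∀ b, taken.contains b = true ↔ ∃ a, subs.get? a = some b) :
    pvCheckA L subs taken = true ↔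
      pvRelOK (fun a b => subs.get? a = some b ∨ (a, b) ∈ L) := by
  induction L generalizing subs taken with
  | nil =>
    simp only [pvCheckA, true_iff]
    intro a b c d h1 h2
    simp only [List.not_mem_nil, or_false] at h1 h2
    exact Hfun a b c d h1 h2
  | cons hd rest ih =>
    obtain ⟨x, y⟩ := hd
    simp only [pvCheckA]
    cases hx : subs.get? x with
    | some v =>
      change (if v ≠ y then false else pvCheckA rest subs taken) = true ↔ _
      by_cases hv : v = y
      · subst hv
        rw [if_neg (by simp : ¬ (v ≠ v))]
        rw [ih subs taken Hfun Htaken]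
        apply pvRelOK_congr
        intro a b
        constructor
        · rintro (h | h)
          · exact Or.inl h
          · exact Or.inr (List.mem_cons_of_mem _ h)
        · rintro (h | h)
          · exact Or.inl h
          · rcases List.mem_cons.1 h with h | h
            · exact Or.inl (by cases h; exact hx)
            · exact Or.inr h
      · rw [if_pos hv]
        simp only [Bool.false_eq_true, false_iff]
        intro hOK
        exact hv ((hOK x v x y (Or.inl hx) (Or.inr List.mem_cons_self)).1 rfl)
    | none =>
      change (if taken.contains y then false else
        pvCheckA rest (subs.insert x y) (PySem.Set.add taken y)) = true ↔ _
      by_cases ht : taken.contains y = true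
      · rw [if_pos ht]
        simp only [Bool.false_eq_true, false_iff]
        intro hOK
        obtain ⟨a, ha⟩ := (Htaken y).1 ht
        have hax : a = x := (hOK a y x y (Or.inl ha) (Or.inr List.mem_cons_self)).2 rfl
        rw [hax, hx] at ha
        simp at ha
      · rw [if_neg ht]
        have hget : ∀ a, (subs.insert x y).get? a = if a = x then some y else subs.get? a :=
          fun a => PySem.Dict.get?_insert subs x a y
        have Hfun' : pvRelOK (fun a b => (subs.insert x y).get? a = some b) := by
          intro a b c d h1 h2
          rw [hget] at h1 h2
          by_cases hax : a = x
          · rw [if_pos hax] at h1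
            have hb : b = y := (Option.some.inj h1).symm
            by_cases hcx : c = x
            · rw [if_pos hcx] at h2
              have hd : d = y := (Option.some.inj h2).symm
              rw [hax, hcx, hb, hd]; simp
            · rw [if_neg hcx] at h2
              constructor
              · intro hac; exact absurd (hac.symm.trans hax) hcx
              · intro hbd
                have hdy : d = y := hbd.symm.trans hb
                exact absurd ((Htaken y).2 ⟨c, hdy ▸ h2⟩) ht
          · rw [if_neg hax] at h1
            by_cases hcx : c = x
            · rw [if_pos hcx] at h2
              have hd : d = y := (Option.some.inj h2).symm
              constructor
              · intro hac; exact absurd (hac.trans hcx) hax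
              · intro hbd
                have hby : b = y := hbd.trans hd
                exact absurd ((Htaken y).2 ⟨a, hby ▸ h1⟩) ht
            · rw [if_neg hcx] at h2
              exact Hfun a b c d h1 h2
        have Htaken' : ∀ b, (PySem.Set.add taken y).contains b = true ↔
            ∃ a, (subs.insert x y).get? a = some b := by
          intro b
          rw [PySem.Set.contains_iff, PySem.Set.mem_add]
          constructor
          · rintro (h | h)
            · obtain ⟨a, ha⟩ := (Htaken b).1 ((PySem.Set.contains_iff taken b).2 h)
              refine ⟨a, ?_⟩
              rw [hget, if_neg ?_]
              · exact ha
              · intro hax; rw [hax, hx] at ha; simp at ha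
            · exact ⟨x, by rw [hget, if_pos rfl, h]⟩
          · rintro ⟨a, ha⟩
            rw [hget] at ha
            by_cases hax : a = x
            · rw [if_pos hax] at ha
              exact Or.inr (Option.some.inj ha).symm
            · rw [if_neg hax] at ha
              exact Or.inl ((PySem.Set.contains_iff taken b).1 ((Htaken b).2 ⟨a, ha⟩))
        rw [ih _ _ Hfun' Htaken']
        apply pvRelOK_congr
        intro a b
        rw [hget]
        by_cases hax : a = x
        · rw [if_pos hax]
          subst hax
          constructor
          · rintro (h | h)
            · have hb : b = y := (Option.some.inj h).symm
              exact Or.inr (List.mem_cons.2 (Or.inl (by rw [hb])))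
            · exact Or.inr (List.mem_cons_of_mem _ h)
          · rintro (h | h)
            · rw [hx] at h; simp at h
            · rcases List.mem_cons.1 h with h | h
              · have hb : b = y := (Prod.mk.injEq _ _ _ _ ▸ h : _ ∧ _).2
                exact Or.inl (by rw [hb])
              · exact Or.inr h
        · rw [if_neg hax]
          constructor
          · rintro (h | h)
            · exact Or.inl h
            · exact Or.inr (List.mem_cons_of_mem _ h)
          · rintro (h | h)
            · exact Or.inl h
            · rcases List.mem_cons.1 h with h | h
              · exact absurd ((Prod.mk.injEq _ _ _ _ ▸ h : _ ∧ _).1) hax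
              · exact Or.inr h

-- membership in a zip of equal-length lists, by index
theorem pvMem_zip {w p : List Char} (hlen : w.length = p.length) (a b : Char) :
    (a, b) ∈ w.zip p ↔ ∃ k : Nat, ∃ h : k < w.length, w[k] = a ∧ p[k]'(hlen ▸ h) = b := by
  rw [List.mem_iff_getElem]
  constructor
  · rintro ⟨k, hk, hget⟩
    rw [List.length_zip, hlen, Nat.min_self] at hk
    refine ⟨k, hlen ▸ hk, ?_, ?_⟩
    · have := congrArg Prod.fst hget
      simpa [List.getElem_zip] using this
    · have := congrArg Prod.snd hget
      simpa [List.getElem_zip] using this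
  · rintro ⟨k, hk, h1, h2⟩
    refine ⟨k, by rw [List.length_zip, hlen, Nat.min_self]; exact hlen ▸ hk, ?_⟩
    simp [List.getElem_zip, h1, h2]

-- A's inner-loop success from the empty state = the pairwise positional condition
theorem pvCheckA_empty_iff {w p : List Char} (hlen : w.length = p.length) :
    pvCheckA (w.zip p) PySem.Dict.empty PySem.Set.empty = true ↔
      ∀ i j : Nat, ∀ hi : i < w.length, ∀ hj : j < w.length,
        (w[i] = w[j] ↔ p[i]'(hlen ▸ hi) = p[j]'(hlen ▸ hj)) := by
  rw [pvCheckA_iff _ _ _ (by intro a b c d h1 h2; simp [PySem.Dict.get?_empty] at h1)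
        (by intro b
            constructor
            · intro h; simp [PySem.Set.empty, PySem.Set.contains] at h
            · rintro ⟨a, ha⟩; simp [PySem.Dict.get?_empty] at ha)]
  have hmem := pvMem_zip hlen
  constructor
  · intro hOK i j hi hj
    exact hOK w[i] (p[i]'(hlen ▸ hi)) w[j] (p[j]'(hlen ▸ hj))
      (Or.inr ((hmem _ _).2 ⟨i, hi, rfl, rfl⟩))
      (Or.inr ((hmem _ _).2 ⟨j, hj, rfl, rfl⟩))
  · intro h a b c d h1 h2
    rcases h1 with h1 | h1
    · simp [PySem.Dict.get?_empty] at h1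
    rcases h2 with h2 | h2
    · simp [PySem.Dict.get?_empty] at h2
    obtain ⟨i, hi, hwa, hpa⟩ := (hmem a b).1 h1
    obtain ⟨j, hj, hwc, hpc⟩ := (hmem c d).1 h2
    subst hwa; subst hpa; subst hwc; subst hpc
    exact h i j hi hj

-- B's per-word boolean = the same pairwise positional condition
theorem pvAllPairs_iff {w p : List Char} (hlen : w.length = p.length) :
    ((PySem.List.pyRange 0 (p.length : Int) 1).all (fun j =>
      (PySem.List.pyRange 0 j 1).all (fun i =>
        (PySem.List.pyGetD w i ' ' == PySem.List.pyGetD w j ' ') ==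
        (PySem.List.pyGetD p i ' ' == PySem.List.pyGetD p j ' '))) = true) ↔
      ∀ i j : Nat, ∀ hi : i < w.length, ∀ hj : j < w.length,
        (w[i] = w[j] ↔ p[i]'(hlen ▸ hi) = p[j]'(hlen ▸ hj)) := by
  simp only [List.all_eq_true]
  have key : (∀ j ∈ PySem.List.pyRange 0 (p.length : Int) 1,
        ∀ i ∈ PySem.List.pyRange 0 j 1,
        ((PySem.List.pyGetD w i ' ' == PySem.List.pyGetD w j ' ') ==
         (PySem.List.pyGetD p i ' ' == PySem.List.pyGetD p j ' ')) = true) →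
      ∀ i j : Nat, ∀ hij : i < j, ∀ hj : j < w.length,
        (w[i]'(Nat.lt_trans hij hj) = w[j] ↔
         p[i]'(hlen ▸ Nat.lt_trans hij hj) = p[j]'(hlen ▸ hj)) := by
    intro h i j hij hj
    have hi : i < w.length := Nat.lt_trans hij hj
    have h2 := h (j : Int)
      (PySem.List.mem_pyRange_one.2 ⟨Int.natCast_nonneg j, by exact_mod_cast hlen ▸ hj⟩)
      (i : Int) (PySem.List.mem_pyRange_one.2 ⟨Int.natCast_nonneg i, by exact_mod_cast hij⟩)
    rw [PySem.List.pyGetD_eq_getElem _ _ (Int.natCast_nonneg i) (by exact_mod_cast hi),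
        PySem.List.pyGetD_eq_getElem _ _ (Int.natCast_nonneg j) (by exact_mod_cast hj),
        PySem.List.pyGetD_eq_getElem _ _ (Int.natCast_nonneg i) (by exact_mod_cast (hlen ▸ hi)),
        PySem.List.pyGetD_eq_getElem _ _ (Int.natCast_nonneg j) (by exact_mod_cast (hlen ▸ hj))] at h2
    simp only [Int.toNat_natCast] at h2
    rw [beq_iff_eq, Bool.eq_iff_iff] at h2
    simpa [beq_iff_eq] using h2
  constructor
  · intro h i j hi hj
    rcases Nat.lt_trichotomy i j with hij | hij | hij
    · exact key h i j hij hj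
    · subst hij; simp
    · have := key h j i hij hi
      exact ⟨fun he => (this.1 he.symm).symm, fun he => (this.2 he.symm).symm⟩
  · intro h j hjmem i himem
    obtain ⟨hj0, hjn⟩ := PySem.List.mem_pyRange_one.1 hjmem
    obtain ⟨hi0, hij⟩ := PySem.List.mem_pyRange_one.1 himem
    have hjw : j.toNat < w.length := by rw [hlen]; omega
    have hiw : i.toNat < w.length := by omega
    rw [PySem.List.pyGetD_eq_getElem _ _ hi0 (by omega),
        PySem.List.pyGetD_eq_getElem _ _ hj0 (by omega),
        PySem.List.pyGetD_eq_getElem _ _ hi0 (by rw [hlen] at hiw; omega),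
        PySem.List.pyGetD_eq_getElem _ _ hj0 (by rw [hlen] at hjw; omega)]
    rw [beq_iff_eq, Bool.eq_iff_iff]
    simpa [beq_iff_eq] using h i.toNat j.toNat hiw hjw

-- fold with conditional append = filter
theorem pvFoldl_filter (P : String → Bool) (ws : List String) (acc : List String) :
    ws.foldl (fun r w => if P w then r ++ [w] else r) acc = acc ++ ws.filter P := by
  induction ws generalizing acc with
  | nil => simp
  | cons a l ih =>
    simp only [List.foldl_cons, List.filter_cons]
    by_cases h : P a = true
    · rw [if_pos h, if_pos h, ih]; simp
    · rw [if_neg h, if_neg h, ih]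

-- ===== VERDICT (by name: the statement is the Claim_ definition above) =====
theorem substitution_words_spec : Claim_equal_substitution_words := by
  intro pattern words _
  show substitution_words pattern words = substitution_words_alt pattern words
  simp only [substitution_words, substitution_words_alt]
  set P : String → Bool := fun word =>
    decide ((word.toList.length : Int) = (pattern.toList.length : Int)) &&
    (PySem.List.pyRange 0 (pattern.toList.length : Int) 1).all (fun j =>
      (PySem.List.pyRange 0 j 1).all (fun i =>
        (PySem.List.pyGetD word.toList i ' ' == PySem.List.pyGetD word.toList j ' ') ==
        (PySem.List.pyGetD pattern.toList i ' ' == PySem.List.pyGetD pattern.toList j ' '))) with hP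
  have hbody : (fun (result : List String) (word : String) =>
      if word.toList.length = pattern.toList.length then
        if pvCheckA (word.toList.zip pattern.toList) PySem.Dict.empty PySem.Set.empty
        then result ++ [word] else result
      else result) = (fun (r : List String) (w : String) => if P w then r ++ [w] else r) := by
    funext r word
    by_cases hl : word.toList.length = pattern.toList.length
    · rw [if_pos hl]
      have hPd : P word = pvCheckA (word.toList.zip pattern.toList) PySem.Dict.empty PySem.Set.empty := by
        rw [hP]
        simp only [hl, decide_true, Bool.true_and]
        rw [Bool.eq_iff_iff, pvAllPairs_iff hl, pvCheckA_empty_iff hl]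
      rw [hPd]
    · rw [if_neg hl]
      have hli : ¬ ((word.toList.length : Int) = (pattern.toList.length : Int)) := by
        exact_mod_cast hl
      have hPf : P word = false := by
        simp only [hP]
        rw [decide_eq_false hli, Bool.false_and]
      rw [hPf]; simp
  rw [hbody, pvFoldl_filter, List.nil_append]
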